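-- pv_equiv track=rewrite | github.com/iasomura/nextstep2026 | phishing_agent/tools/short_domain_analysis.py | _count_consonant_clusters
-- ===== SOURCE A (Python) =====
-- _CONSONANTS = frozenset("bcdfghjklmnpqrstvwxyz")
--
-- def _count_consonant_clusters(text: str) -> int:
--     """3文字以上の連続子音クラスターの数をカウント."""
--     cluster_count = 0
--     current_run = 0
--     for ch in text.lower():
--         if ch in _CONSONANTS:
--             current_run += 1
--         else:
--             if current_run >= 3:
--                 cluster_count += 1
--             current_run = 0
--     if current_run >= 3:
--         cluster_count += 1
--     return cluster_count
-- ===== SOURCE B (Python) =====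
-- _CONSONANTS = frozenset("bcdfghjklmnpqrstvwxyz")
--
-- def _count_consonant_clusters(text: str) -> int:
--     """Run-jumping scan: locate each maximal consonant run and skip past it."""
--     t = text.lower()
--     n = len(t)
--     count = 0
--     i = 0
--     while i < n:
--         if t[i] in _CONSONANTS:
--             j = i + 1
--             while j < n and t[j] in _CONSONANTS:
--                 j += 1
--             if j - i >= 3:
--                 count += 1
--             i = j
--         else:
--             i += 1
--     return count
-- ===== Notes on version B (the rewrite author's own statement) =====
-- stated objective: alternative
-- what changed: Replaced the per-character state machine (run counter with reset and a trailing-run fixup) by a run-jumping scan that finds each maximal consonant run in one inner step, tests its length once, and skips past it, with no carried run state or end-of-string special case.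
import Mathlib
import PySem

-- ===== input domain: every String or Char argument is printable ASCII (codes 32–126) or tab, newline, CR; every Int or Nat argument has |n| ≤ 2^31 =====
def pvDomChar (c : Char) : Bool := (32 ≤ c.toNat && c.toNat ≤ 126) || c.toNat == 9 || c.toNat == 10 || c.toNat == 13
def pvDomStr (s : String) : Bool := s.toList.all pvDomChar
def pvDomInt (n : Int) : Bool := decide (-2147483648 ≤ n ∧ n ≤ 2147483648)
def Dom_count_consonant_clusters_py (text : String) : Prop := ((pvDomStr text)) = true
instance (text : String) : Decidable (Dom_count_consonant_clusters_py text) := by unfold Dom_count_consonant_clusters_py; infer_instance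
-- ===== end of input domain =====

-- B replaces A's per-character run counter by a run-jumping scan over maximal consonant runs (alternative, same cost).

-- membership in the frozenset "bcdfghjklmnpqrstvwxyz"
def pvIsCons (c : Char) : Bool :=
  ['b','c','d','f','g','h','j','k','l','m','n','p','q','r','s','t','v','w','x','y','z'].contains c

-- ===== PORT A =====
-- the for-loop over text.lower() carrying (cluster_count, current_run)
def ccGoA (cnt run : Int) : List Char → Int
  | [] => if 3 ≤ run then cnt + 1 else cnt
  | c :: cs => if pvIsCons c then ccGoA cnt (run + 1) cs
               else ccGoA (if 3 ≤ run then cnt + 1 else cnt) 0 cs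

def count_consonant_clusters_py (text : String) : Int :=
  ccGoA 0 0 (PySem.Str.lower text).toList

-- ===== PORT B =====
-- the outer while-loop: at a consonant, the inner while finds the end of the
-- maximal run (takeWhile/dropWhile), the run is counted if its length is ≥ 3,
-- and the scan resumes past it; at a non-consonant it steps one char.
def ccGoB : List Char → Int
  | [] => 0
  | c :: cs =>
    if h : pvIsCons c then
      (if 3 ≤ (((c :: cs).takeWhile pvIsCons).length : Int) then 1 else 0)
        + ccGoB ((c :: cs).dropWhile pvIsCons)
    else ccGoB cs
termination_by l => l.length
decreasing_by
  · simp only [List.dropWhile, h, List.length_cons]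
    exact Nat.lt_succ_of_le (List.length_dropWhile_le _ _)
  · simp
def count_consonant_clusters_py_alt (text : String) : Int :=
  ccGoB (PySem.Str.lower text).toList

-- ===== PRECONDITION & SPEC =====
def Spec_count_consonant_clusters_py (text : String) (out : Int) : Prop := out = count_consonant_clusters_py_alt text
instance (text : String) (out : Int) : Decidable (Spec_count_consonant_clusters_py text out) := by unfold Spec_count_consonant_clusters_py; infer_instance

-- ===== CLAIM (what is proved, stated in full; the proofs are below) =====
def Claim_equal_count_consonant_clusters_py : Prop := ∀ (text : String), Dom_count_consonant_clusters_py text → Spec_count_consonant_clusters_py text (count_consonant_clusters_py text)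

-- ===== LEMMAS AND PROOFS =====

-- the "count this run" indicator
def pvCl (r : Int) : Int := if 3 ≤ r then 1 else 0

-- B counts its leading run and proceeds past it (trivial when the head is not a consonant)
theorem ccGoB_eq (l : List Char) :
    ccGoB l = pvCl ((l.takeWhile pvIsCons).length : Int) + ccGoB (l.dropWhile pvIsCons) := by
  cases l with
  | nil => simp [ccGoB, pvCl]
  | cons c cs =>
    by_cases h : pvIsCons c = true
    · rw [ccGoB]; simp [h, pvCl]
    · simp only [List.takeWhile, List.dropWhile, h]
      rw [ccGoB]; simp [h, pvCl]

-- loop invariant: A with pending run `run` equals the run-jumping count of the rest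
theorem ccGoA_eq (l : List Char) : ∀ (cnt run : Int),
    ccGoA cnt run l
      = cnt + pvCl (run + ((l.takeWhile pvIsCons).length : Int))
          + ccGoB (l.dropWhile pvIsCons) := by
  induction l with
  | nil =>
    intro cnt run
    simp only [ccGoA, List.takeWhile, List.dropWhile, ccGoB, pvCl, List.length_nil,
      Nat.cast_zero, add_zero]
    split_ifs <;> omega
  | cons c cs ih =>
    intro cnt run
    by_cases h : pvIsCons c = true
    · rw [ccGoA, if_pos h, ih, List.takeWhile_cons_of_pos h, List.dropWhile_cons_of_pos h,
        List.length_cons]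
      unfold pvCl
      push_cast
      split_ifs <;> omega
    · rw [ccGoA, if_neg h, ih, List.takeWhile_cons_of_neg h, List.dropWhile_cons_of_neg h]
      have hc : ccGoB (c :: cs) = ccGoB cs := by rw [ccGoB]; simp [h]
      rw [hc, ccGoB_eq cs]
      unfold pvCl
      simp only [List.length_nil, Nat.cast_zero, add_zero]
      split_ifs <;> omega

-- ===== VERDICT (by name: the statement is the Claim_ definition above) =====
theorem count_consonant_clusters_py_spec : Claim_equal_count_consonant_clusters_py := by
  intro text _
  unfold Spec_count_consonant_clusters_py count_consonant_clusters_py count_consonant_clusters_py_alt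
  rw [ccGoA_eq, ccGoB_eq ((PySem.Str.lower text).toList)]
  simp [pvCl]
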